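-- pv_equiv track=rewrite | github.com/victor0777/OccAny | occany/datasets/eval_helper.py | _build_nuscenes_scene_token_time_index
-- ===== SOURCE A (Python) =====
-- from typing import Any, Dict, Optional
--
-- def _build_nuscenes_scene_token_time_index(scene_info: Dict[str, Dict[str, Any]]) -> Dict[str, int]:
--     if not scene_info:
--         return {}
--
--     remaining_tokens = set(scene_info.keys())
--     token_to_time_index: Dict[str, int] = {}
--     time_index = 0
--
--     while remaining_tokens:
--         pointed_tokens = set()
--         for token in remaining_tokens:
--             next_token = scene_info[token].get("next")
--             if next_token in remaining_tokens:
--                 pointed_tokens.add(next_token)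
--
--         start_tokens = sorted(token for token in remaining_tokens if token not in pointed_tokens)
--         if not start_tokens:
--             start_tokens = [sorted(remaining_tokens)[0]]
--
--         for start_token in start_tokens:
--             if start_token not in remaining_tokens:
--                 continue
--
--             token = start_token
--             while token in remaining_tokens:
--                 token_to_time_index[token] = time_index
--                 time_index += 1
--                 remaining_tokens.remove(token)
--
--                 next_token = scene_info[token].get("next")
--                 if next_token in (None, "", "EOF") or next_token not in remaining_tokens:
--                     break
--                 token = next_token
--
--     return token_to_time_index
-- ===== SOURCE B (Python) =====
-- def _build_nuscenes_scene_token_time_index(scene_info):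
--     if not scene_info:
--         return {}
--
--     nxt = {token: info.get("next") for token, info in scene_info.items()}
--     indeg = {token: 0 for token in nxt}
--     for n in nxt.values():
--         if n in indeg:
--             indeg[n] += 1
--
--     remaining = set(nxt)
--     order = sorted(nxt)          # sorted once; ptr walks it to find min(remaining)
--     ptr = 0
--     token_to_time_index = {}
--     time_index = 0
--     newly = [t for t in order if indeg[t] == 0]   # in-degree-0 tokens = this round's starts
--
--     while remaining:
--         starts = [t for t in sorted(newly) if t in remaining]
--         newly = []
--         if not starts:
--             while order[ptr] not in remaining:
--                 ptr += 1
--             starts = [order[ptr]]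
--         for start in starts:
--             token = start
--             while token in remaining:
--                 token_to_time_index[token] = time_index
--                 time_index += 1
--                 remaining.remove(token)
--                 n = nxt[token]
--                 if n in indeg and n in remaining:
--                     indeg[n] -= 1
--                     if indeg[n] == 0:
--                         newly.append(n)
--                 if n in (None, "", "EOF") or n not in remaining:
--                     break
--                 token = n
--
--     return token_to_time_index
-- ===== Notes on version B (the rewrite author's own statement) =====
-- stated objective: alternative
-- what changed: A rescans all remaining tokens every outer round to rebuild the pointed-token set and re-sorts the remaining set whenever no start exists; B precomputes next-pointers and in-degree counts once, maintains the in-degrees under removal so each round's start tokens are exactly the tokens that just dropped to in-degree 0, and finds the minimal remaining token with a monotone pointer into the once-sorted key list.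
import Mathlib
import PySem

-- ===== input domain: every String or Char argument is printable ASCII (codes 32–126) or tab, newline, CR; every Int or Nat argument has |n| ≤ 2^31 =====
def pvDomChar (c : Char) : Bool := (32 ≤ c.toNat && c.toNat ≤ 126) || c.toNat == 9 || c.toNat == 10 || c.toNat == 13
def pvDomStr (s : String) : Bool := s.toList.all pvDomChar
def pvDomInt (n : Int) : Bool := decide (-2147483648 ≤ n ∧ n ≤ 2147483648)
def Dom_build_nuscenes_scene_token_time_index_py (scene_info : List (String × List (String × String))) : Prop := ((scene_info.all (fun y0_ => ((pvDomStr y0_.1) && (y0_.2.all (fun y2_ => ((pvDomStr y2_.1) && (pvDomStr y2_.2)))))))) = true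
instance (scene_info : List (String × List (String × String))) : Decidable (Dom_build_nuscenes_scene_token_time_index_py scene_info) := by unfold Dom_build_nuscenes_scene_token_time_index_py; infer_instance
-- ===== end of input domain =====

-- B replaces A's per-round rescans (recomputing the pointed set and re-sorting the remaining
-- tokens every round) by in-degree counts maintained once under removal plus a monotone pointer
-- into the once-sorted token list; a different bookkeeping with the same return value.

-- shared accessor: scene_info[token].get("next") (assoc-list convention: first match)
def pvNext (m : List (String × List (String × String))) (t : String) : Option String :=
  match m.find? (fun p => p.1 == t) with
  | some p => (p.2.find? (fun q => q.1 == "next")).map (fun q => q.2)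
  | none => none

-- ===== PORT A =====
structure PvStA where
  rem : PySem.Set String
  out : PySem.Dict String Int
  idx : Int

-- the inner 'while token in remaining_tokens' loop of A
def pvChainA (m : List (String × List (String × String))) : Nat → PvStA → String → PvStA
  | 0, st, _ => st
  | fuel+1, st, token =>
    if PySem.Set.contains st.rem token then
      let out := st.out.insert token st.idx
      let i := st.idx + 1
      let rem := PySem.Set.discard st.rem token
      match pvNext m token with
      | none => ⟨rem, out, i⟩
      | some n =>
        if n == "" || n == "EOF" || !(PySem.Set.contains rem n) then ⟨rem, out, i⟩
        else pvChainA m fuel ⟨rem, out, i⟩ n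
    else st

-- one iteration of A's outer 'while remaining_tokens' loop
def pvRoundA (m : List (String × List (String × String))) (st : PvStA) : PvStA :=
  let pointed : PySem.Set String := st.rem.foldl (fun acc token =>
      match pvNext m token with
      | some n => if PySem.Set.contains st.rem n then PySem.Set.add acc n else acc
      | none => acc) PySem.Set.empty
  let starts := PySem.List.sorted (st.rem.filter (fun t => !(PySem.Set.contains pointed t))) (fun x => x) false
  let starts := if starts.isEmpty then [(PySem.List.sorted st.rem (fun x => x) false).headD ""] else starts
  starts.foldl (fun s tok => if PySem.Set.contains s.rem tok then pvChainA m s.rem.length s tok else s) st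

def pvRoundsA (m : List (String × List (String × String))) : Nat → PvStA → PySem.Dict String Int
  | 0, st => st.out
  | fuel+1, st => if st.rem.isEmpty then st.out else pvRoundsA m fuel (pvRoundA m st)

def build_nuscenes_scene_token_time_index_py (scene_info : List (String × List (String × String))) : List (String × Int) :=
  if scene_info.isEmpty then []
  else
    let rem : PySem.Set String := PySem.Set.ofList (scene_info.map (fun p => p.1))
    (pvRoundsA scene_info (rem.length + 1) ⟨rem, PySem.Dict.empty, 0⟩).items

-- ===== PORT B =====
structure PvStB where
  rem : PySem.Set String
  out : PySem.Dict String Int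
  idx : Int
  indeg : PySem.Dict String Int
  newly : List String

-- nxt[t] (Source B's precomputed dict of next pointers)
def pvGetNxt (nxt : List (String × Option String)) (t : String) : Option String :=
  match nxt.find? (fun p => p.1 == t) with
  | some p => p.2
  | none => none

-- Source B's inner 'while token in remaining' loop (also maintains indeg and newly)
def pvChainB (nxt : List (String × Option String)) : Nat → PvStB → String → PvStB
  | 0, st, _ => st
  | fuel+1, st, token =>
    if PySem.Set.contains st.rem token then
      let out := st.out.insert token st.idx
      let i := st.idx + 1
      let rem := PySem.Set.discard st.rem token
      let n := pvGetNxt nxt token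
      let dn : PySem.Dict String Int × List String :=
        match n with
        | some s =>
          if st.indeg.contains s && PySem.Set.contains rem s then
            let d := st.indeg.modify s 0 (fun v => v - 1)
            (d, if d.getD s 0 == 0 then st.newly ++ [s] else st.newly)
          else (st.indeg, st.newly)
        | none => (st.indeg, st.newly)
      match n with
      | none => ⟨rem, out, i, dn.1, dn.2⟩
      | some s =>
        if s == "" || s == "EOF" || !(PySem.Set.contains rem s) then ⟨rem, out, i, dn.1, dn.2⟩
        else pvChainB nxt fuel ⟨rem, out, i, dn.1, dn.2⟩ s
    else st

-- Source B's 'while order[ptr] not in remaining: ptr += 1'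
def pvScanPtr (order : List String) (rem : PySem.Set String) : Nat → Nat → Nat
  | 0, ptr => ptr
  | fuel+1, ptr => if PySem.Set.contains rem (order.getD ptr "") then ptr else pvScanPtr order rem fuel (ptr+1)

-- one iteration of Source B's outer 'while remaining' loop
def pvRoundB (nxt : List (String × Option String)) (order : List String) (st : PvStB) (ptr : Nat) : PvStB × Nat :=
  let starts := (PySem.List.sorted st.newly (fun x => x) false).filter (fun t => PySem.Set.contains st.rem t)
  let st : PvStB := { st with newly := [] }
  let sp : List String × Nat :=
    if starts.isEmpty then
      let p := pvScanPtr order st.rem order.length ptr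
      ([order.getD p ""], p)
    else (starts, ptr)
  (sp.1.foldl (fun s tok => pvChainB nxt s.rem.length s tok) st, sp.2)

def pvRoundsB (nxt : List (String × Option String)) (order : List String) : Nat → PvStB × Nat → PySem.Dict String Int
  | 0, sp => sp.1.out
  | fuel+1, sp => if sp.1.rem.isEmpty then sp.1.out else pvRoundsB nxt order fuel (pvRoundB nxt order sp.1 sp.2)

def build_nuscenes_scene_token_time_index_py_alt (scene_info : List (String × List (String × String))) : List (String × Int) :=
  if scene_info.isEmpty then []
  else
    -- Source B: nxt = {token: info.get("next") for token, info in scene_info.items()} — dict keys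
    -- are the distinct tokens (first occurrence), values looked up by the first-match convention
    let keys := PySem.List.dedup (scene_info.map (fun p => p.1))
    let nxt : List (String × Option String) := keys.map (fun t => (t, pvNext scene_info t))
    let indeg0 : PySem.Dict String Int := keys.foldl (fun d t => d.insert t (0 : Int)) PySem.Dict.empty
    let indeg : PySem.Dict String Int := nxt.foldl (fun d p =>
        match p.2 with
        | some s => if d.contains s then d.modify s 0 (fun v => v + 1) else d
        | none => d) indeg0
    let rem : PySem.Set String := PySem.Set.ofList keys
    let order := PySem.List.sorted keys (fun x => x) false
    let newly := order.filter (fun t => indeg.getD t 0 == 0)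
    (pvRoundsB nxt order (rem.length + 1) (⟨rem, PySem.Dict.empty, 0, indeg, newly⟩, 0)).items

-- ===== PRECONDITION & SPEC =====
def Spec_build_nuscenes_scene_token_time_index_py (scene_info : List (String × List (String × String))) (out : List (String × Int)) : Prop := out = build_nuscenes_scene_token_time_index_py_alt scene_info
instance (scene_info : List (String × List (String × String))) (out : List (String × Int)) : Decidable (Spec_build_nuscenes_scene_token_time_index_py scene_info out) := by unfold Spec_build_nuscenes_scene_token_time_index_py; infer_instance

-- ===== CLAIM (what is proved, stated in full; the proofs are below) =====
def Claim_equal_build_nuscenes_scene_token_time_index_py : Prop := ∀ (scene_info : List (String × List (String × String))), Dom_build_nuscenes_scene_token_time_index_py scene_info → Spec_build_nuscenes_scene_token_time_index_py scene_info (build_nuscenes_scene_token_time_index_py scene_info)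

-- ===== LEMMAS AND PROOFS =====

-- invariants of the coupling
def PvIDeg (m : List (String × List (String × String))) (rem : List String) (indeg : PySem.Dict String Int) : Prop :=
  ∀ t ∈ rem, indeg.getD t 0 = ((rem.filter (fun u => pvNext m u == some t)).length : Int)
def PvIKeys (keys : List String) (indeg : PySem.Dict String Int) : Prop :=
  ∀ s, indeg.contains s = true ↔ s ∈ keys
def PvISub (rem newly : List String) (indeg : PySem.Dict String Int) : Prop :=
  ∀ t ∈ newly, t ∈ rem → indeg.getD t 0 = 0
def PvISup (rem newly S : List String) (indeg : PySem.Dict String Int) : Prop :=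
  ∀ t ∈ rem, indeg.getD t 0 = 0 → t ∈ newly ∨ t ∈ S

theorem pvGetNxt_eq (m : List (String × List (String × String))) (keys : List String) (t : String)
    (ht : t ∈ keys) : pvGetNxt (keys.map (fun t => (t, pvNext m t))) t = pvNext m t := by
  induction keys with
  | nil => cases ht
  | cons k ks ih =>
    by_cases hk : k = t
    · subst hk; simp [pvGetNxt]
    · have h : t ∈ ks := by
        rcases List.mem_cons.mp ht with h | h
        · exact absurd h.symm hk
        · exact h
      simpa [pvGetNxt, hk] using ih h


-- ---- small list/set facts ----
theorem pvFilterDiscardLen (s : List String) (x : String) (q : String → Bool)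
    (hnd : s.Nodup) (hx : x ∈ s) :
    (s.filter q).length = ((PySem.Set.discard s x).filter q).length + (if q x then 1 else 0) := by
  induction s with
  | nil => cases hx
  | cons a t ih =>
    rcases List.nodup_cons.mp hnd with ⟨hna, hnt⟩
    by_cases hax : a = x
    · subst hax
      have ht : t.filter (fun y => !(y == a)) = t :=
        List.filter_eq_self.mpr (fun y hy => by simp; rintro rfl; exact hna hy)
      simp only [PySem.Set.discard, List.filter_cons]
      simp only [beq_self_eq_true, Bool.not_true, ht]
      by_cases hqa : q a = true <;> simp [hqa]
    · have hx' : x ∈ t := by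
        rcases List.mem_cons.mp hx with h | h
        · exact absurd h.symm hax
        · exact h
      have ih' := ih hnt hx'
      simp only [PySem.Set.discard, List.filter_cons] at *
      have hne : (a == x) = false := beq_false_of_ne hax
      simp only [hne, Bool.not_false, if_true]
      by_cases hqa : q a = true
      · simp [hqa, ih']
        omega
      · simp [hqa, ih']

theorem pvDiscardLen (s : List String) (x : String) (hnd : s.Nodup) (hx : x ∈ s) :
    (PySem.Set.discard s x).length + 1 = s.length := by
  have h := pvFilterDiscardLen s x (fun _ => true) hnd hx
  simpa using h.symm

-- chainB is the identity when the token is not in remaining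
theorem pvChainB_not_mem (nxt : List (String × Option String)) (fuel : Nat) (st : PvStB) (tok : String)
    (h : PySem.Set.contains st.rem tok = false) : pvChainB nxt fuel st tok = st := by
  cases fuel with
  | zero => rfl
  | succ f =>
    have h' : tok ∉ st.rem := by simpa using h
    simp [pvChainB, h']

-- ---- common tail of one chain step: break test, possible recursion ----
theorem pvChainStepFinish (m : List (String × List (String × String))) (keys : List String)
    (nxt : List (String × Option String))
    (f : Nat)
    (ih : ∀ (tok : String) (a : PvStA) (indeg : PySem.Dict String Int) (newly S : List String),
      a.rem.Nodup → (∀ x ∈ a.rem, x ∈ keys) → a.rem.length ≤ f →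
      PvIKeys keys indeg → PvIDeg m a.rem indeg → newly.Nodup →
      PvISub a.rem newly indeg → PvISup a.rem newly (tok :: S) indeg →
      ∃ indeg' newly',
        pvChainB nxt f ⟨a.rem, a.out, a.idx, indeg, newly⟩ tok =
          ⟨(pvChainA m f a tok).rem, (pvChainA m f a tok).out, (pvChainA m f a tok).idx, indeg', newly'⟩ ∧
        (pvChainA m f a tok).rem.Nodup ∧ (∀ x ∈ (pvChainA m f a tok).rem, x ∈ a.rem) ∧
        tok ∉ (pvChainA m f a tok).rem ∧
        PvIKeys keys indeg' ∧ PvIDeg m (pvChainA m f a tok).rem indeg' ∧ newly'.Nodup ∧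
        PvISub (pvChainA m f a tok).rem newly' indeg' ∧ PvISup (pvChainA m f a tok).rem newly' S indeg')
    (tok sn : String) (a : PvStA) (indeg : PySem.Dict String Int) (newly S : List String)
    (hc : PySem.Set.contains a.rem tok = true)
    (hnd' : (PySem.Set.discard a.rem tok).Nodup)
    (hsub' : ∀ x ∈ PySem.Set.discard a.rem tok, x ∈ a.rem)
    (htok' : tok ∉ PySem.Set.discard a.rem tok)
    (hlen' : (PySem.Set.discard a.rem tok).length ≤ f)
    (hsubK' : ∀ x ∈ PySem.Set.discard a.rem tok, x ∈ keys)
    (hn : pvNext m tok = some sn)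
    (indeg1 : PySem.Dict String Int) (newly1 : List String)
    (hB : pvChainB nxt (f+1) ⟨a.rem, a.out, a.idx, indeg, newly⟩ tok =
      (if sn == "" || sn == "EOF" || !(PySem.Set.contains (PySem.Set.discard a.rem tok) sn)
       then ⟨PySem.Set.discard a.rem tok, a.out.insert tok a.idx, a.idx + 1, indeg1, newly1⟩
       else pvChainB nxt f ⟨PySem.Set.discard a.rem tok, a.out.insert tok a.idx, a.idx + 1, indeg1, newly1⟩ sn))
    (hk1 : PvIKeys keys indeg1) (hdeg1 : PvIDeg m (PySem.Set.discard a.rem tok) indeg1)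
    (hnn1 : newly1.Nodup) (hsb1 : PvISub (PySem.Set.discard a.rem tok) newly1 indeg1)
    (hsp1 : PvISup (PySem.Set.discard a.rem tok) newly1 S indeg1) :
    ∃ indeg' newly',
      pvChainB nxt (f+1) ⟨a.rem, a.out, a.idx, indeg, newly⟩ tok =
        ⟨(pvChainA m (f+1) a tok).rem, (pvChainA m (f+1) a tok).out, (pvChainA m (f+1) a tok).idx, indeg', newly'⟩ ∧
      (pvChainA m (f+1) a tok).rem.Nodup ∧ (∀ x ∈ (pvChainA m (f+1) a tok).rem, x ∈ a.rem) ∧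
      tok ∉ (pvChainA m (f+1) a tok).rem ∧
      PvIKeys keys indeg' ∧ PvIDeg m (pvChainA m (f+1) a tok).rem indeg' ∧ newly'.Nodup ∧
      PvISub (pvChainA m (f+1) a tok).rem newly' indeg' ∧ PvISup (pvChainA m (f+1) a tok).rem newly' S indeg' := by
  have hA : pvChainA m (f+1) a tok =
      (if sn == "" || sn == "EOF" || !(PySem.Set.contains (PySem.Set.discard a.rem tok) sn)
       then ⟨PySem.Set.discard a.rem tok, a.out.insert tok a.idx, a.idx + 1⟩
       else pvChainA m f ⟨PySem.Set.discard a.rem tok, a.out.insert tok a.idx, a.idx + 1⟩ sn) := by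
    simp only [pvChainA, hc, if_true, hn]
  by_cases hbr : (sn == "" || sn == "EOF" || !(PySem.Set.contains (PySem.Set.discard a.rem tok) sn)) = true
  · -- the chain breaks here
    rw [if_pos hbr] at hA hB
    refine ⟨indeg1, newly1, ?_, ?_, ?_, ?_, hk1, ?_, hnn1, ?_, ?_⟩
    · rw [hB, hA]
    · rw [hA]; exact hnd'
    · rw [hA]; exact hsub'
    · rw [hA]; exact htok'
    · rw [hA]; exact hdeg1
    · rw [hA]; exact hsb1
    · rw [hA]; exact hsp1
  · -- the chain continues at sn
    have hbr' : (sn == "" || sn == "EOF" || !(PySem.Set.contains (PySem.Set.discard a.rem tok) sn)) = false :=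
      by simpa using hbr
    rw [if_neg hbr] at hA hB
    have hsn' : sn ∈ PySem.Set.discard a.rem tok := by
      rcases Bool.or_eq_false_iff.mp hbr' with ⟨-, h2⟩
      simpa using h2
    have hsp1' : PvISup (PySem.Set.discard a.rem tok) newly1 (sn :: S) indeg1 := by
      intro t ht hz
      rcases hsp1 t ht hz with h | h
      · exact Or.inl h
      · exact Or.inr (List.mem_cons_of_mem _ h)
    rcases ih sn ⟨PySem.Set.discard a.rem tok, a.out.insert tok a.idx, a.idx + 1⟩ indeg1 newly1 S
        hnd' hsubK' hlen' hk1 hdeg1 hnn1 hsb1 hsp1' with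
      ⟨indeg', newly', heq, hr1, hr2, hr3, hr4, hr5, hr6, hr7, hr8⟩
    refine ⟨indeg', newly', ?_, ?_, ?_, ?_, hr4, ?_, hr6, ?_, ?_⟩ <;> rw [hA]
    · rw [hB]; exact heq
    · exact hr1
    · exact fun x hx => hsub' x (hr2 x hx)
    · exact fun hx => htok' (hr2 tok hx)
    · exact hr5
    · exact hr7
    · exact hr8

-- ---- chain coupling ----
theorem pvChain_couple (m : List (String × List (String × String))) (keys : List String)
    (nxt : List (String × Option String)) (hnx : ∀ t ∈ keys, pvGetNxt nxt t = pvNext m t) :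
    ∀ (fuel : Nat) (tok : String) (a : PvStA) (indeg : PySem.Dict String Int) (newly S : List String),
    a.rem.Nodup → (∀ x ∈ a.rem, x ∈ keys) → a.rem.length ≤ fuel →
    PvIKeys keys indeg → PvIDeg m a.rem indeg → newly.Nodup →
    PvISub a.rem newly indeg → PvISup a.rem newly (tok :: S) indeg →
    ∃ indeg' newly',
      pvChainB nxt fuel ⟨a.rem, a.out, a.idx, indeg, newly⟩ tok =
        ⟨(pvChainA m fuel a tok).rem, (pvChainA m fuel a tok).out, (pvChainA m fuel a tok).idx, indeg', newly'⟩ ∧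
      (pvChainA m fuel a tok).rem.Nodup ∧ (∀ x ∈ (pvChainA m fuel a tok).rem, x ∈ a.rem) ∧
      tok ∉ (pvChainA m fuel a tok).rem ∧
      PvIKeys keys indeg' ∧ PvIDeg m (pvChainA m fuel a tok).rem indeg' ∧ newly'.Nodup ∧
      PvISub (pvChainA m fuel a tok).rem newly' indeg' ∧ PvISup (pvChainA m fuel a tok).rem newly' S indeg' := by
  intro fuel
  induction fuel with
  | zero =>
    intro tok a indeg newly S hnd hsubK hlen hk hdeg hnn hsb hsp
    have hrem : a.rem = [] := List.eq_nil_of_length_eq_zero (Nat.le_zero.mp hlen)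
    have hA : pvChainA m 0 a tok = a := rfl
    refine ⟨indeg, newly, rfl, ?_, ?_, ?_, hk, ?_, hnn, ?_, ?_⟩
    · rw [hA]; exact hnd
    · rw [hA]; exact fun x hx => hx
    · rw [hA, hrem]; simp
    · rw [hA]; exact hdeg
    · rw [hA]; exact hsb
    · rw [hA]; intro t ht hz; rw [hrem] at ht; cases ht
  | succ f ih =>
    intro tok a indeg newly S hnd hsubK hlen hk hdeg hnn hsb hsp
    by_cases hc : PySem.Set.contains a.rem tok = true
    · -- token is in remaining: one real step
      have htok : tok ∈ a.rem := by simpa using hc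
      have htokK : tok ∈ keys := hsubK tok htok
      have hnd' : (PySem.Set.discard a.rem tok).Nodup := PySem.Set.nodup_discard a.rem tok hnd
      have hsub' : ∀ x ∈ PySem.Set.discard a.rem tok, x ∈ a.rem :=
        fun x hx => ((PySem.Set.mem_discard a.rem tok x).mp hx).1
      have htok' : tok ∉ PySem.Set.discard a.rem tok :=
        fun hx => ((PySem.Set.mem_discard a.rem tok tok).mp hx).2 rfl
      have hlen' : (PySem.Set.discard a.rem tok).length ≤ f := by
        have := pvDiscardLen a.rem tok hnd htok
        omega
      have hsubK' : ∀ x ∈ PySem.Set.discard a.rem tok, x ∈ keys := fun x hx => hsubK x (hsub' x hx)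
      -- count bookkeeping for every target t
      have hcnt : ∀ t, (a.rem.filter (fun u => pvNext m u == some t)).length =
          ((PySem.Set.discard a.rem tok).filter (fun u => pvNext m u == some t)).length +
          (if pvNext m tok == some t then 1 else 0) :=
        fun t => pvFilterDiscardLen a.rem tok _ hnd htok
      cases hn : pvNext m tok with
      | none =>
        -- next pointer is absent: both stop after this removal, indeg/newly unchanged
        have hA : pvChainA m (f+1) a tok =
            ⟨PySem.Set.discard a.rem tok, a.out.insert tok a.idx, a.idx + 1⟩ := by
          simp [pvChainA, hn, htok]
        have hB : pvChainB nxt (f+1) ⟨a.rem, a.out, a.idx, indeg, newly⟩ tok =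
            ⟨PySem.Set.discard a.rem tok, a.out.insert tok a.idx, a.idx + 1, indeg, newly⟩ := by
          simp [pvChainB, hnx tok htokK, hn, htok]
        have hdeg' : PvIDeg m (PySem.Set.discard a.rem tok) indeg := by
          intro t ht
          have h1 := hdeg t (hsub' t ht)
          have h2 := hcnt t
          rw [hn] at h2
          have hfalse : ((none : Option String) == some t) = false := rfl
          rw [hfalse, if_neg (by simp)] at h2
          rw [h1, h2]
          simp
        refine ⟨indeg, newly, ?_, ?_, ?_, ?_, hk, ?_, hnn, ?_, ?_⟩
        · rw [hA, hB]
        · rw [hA]; exact hnd'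
        · rw [hA]; exact hsub'
        · rw [hA]; exact htok'
        · rw [hA]; exact hdeg'
        · rw [hA]; intro t ht hrt; exact hsb t ht (hsub' t hrt)
        · rw [hA]
          intro t ht hz
          rcases hsp t (hsub' t ht) hz with h | h
          · exact Or.inl h
          · rcases List.mem_cons.mp h with rfl | h'
            · exact absurd ht htok'
            · exact Or.inr h'
      | some sn =>
        -- compute the updated (indeg, newly) pair and its invariants
        by_cases hdec : (indeg.contains sn && PySem.Set.contains (PySem.Set.discard a.rem tok) sn) = true
        · -- decrement branch
          have hsn' : sn ∈ PySem.Set.discard a.rem tok := by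
            have := (Bool.and_eq_true _ _).mp hdec
            simpa using this.2
          have hsnr : sn ∈ a.rem := hsub' sn hsn'
          have hc0 : indeg.getD sn 0 = ((a.rem.filter (fun u => pvNext m u == some sn)).length : Int) :=
            hdeg sn hsnr
          have hpos : 0 < (a.rem.filter (fun u => pvNext m u == some sn)).length :=
            List.length_pos_of_mem (List.mem_filter.mpr ⟨htok, by simp [hn]⟩)
          have hdeg1 : PvIDeg m (PySem.Set.discard a.rem tok) (indeg.modify sn 0 (fun v => v - 1)) := by
            intro t ht
            rw [PySem.Dict.getD_modify]
            have h2 := hcnt t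
            rw [hn] at h2
            by_cases hts : t = sn
            · subst hts
              rw [if_pos rfl]
              rw [hc0]
              simp only [beq_self_eq_true, if_true] at h2
              rw [h2]
              push_cast
              ring
            · rw [if_neg hts]
              have : (some sn == some t) = false := by simp [Ne.symm hts]
              rw [this, if_neg (by simp)] at h2
              rw [hdeg t (hsub' t ht), h2]
              simp
            -- end hdeg1
          have hc0pos : 0 < indeg.getD sn 0 := by rw [hc0]; exact_mod_cast hpos
          have hsn_not_newly : sn ∉ newly := by
            intro hmem
            have := hsb sn hmem hsnr
            omega
          have hk1 : PvIKeys keys (indeg.modify sn 0 (fun v => v - 1)) := by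
            intro x
            rw [← hk x]
            by_cases hx : x = sn
            · subst hx; simp [PySem.Dict.contains_modify, (Bool.and_eq_true _ _).mp hdec |>.1]
            · simp [PySem.Dict.contains_modify, hx]
          have hgd1 : ∀ t, (indeg.modify sn 0 (fun v => v - 1)).getD t 0 =
              if t = sn then indeg.getD sn 0 - 1 else indeg.getD t 0 := by
            intro t; rw [PySem.Dict.getD_modify]
          -- the two possible newly lists
          by_cases hzero : ((indeg.modify sn 0 (fun v => v - 1)).getD sn 0 == 0) = true
          · -- getD sn = 0 after decrement: sn appended to newly
            have hnewly : (if ((indeg.modify sn 0 (fun v => v - 1)).getD sn 0 == 0) = true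
                then newly ++ [sn] else newly) = newly ++ [sn] := by rw [if_pos hzero]
            have hz0 : (indeg.modify sn 0 (fun v => v - 1)).getD sn 0 = 0 := by simpa using hzero
            have hnn1 : (newly ++ [sn]).Nodup := by
              simp only [List.nodup_append, List.nodup_singleton, true_and]
              refine ⟨hnn, ?_⟩
              intro a ha b hb hab
              simp only [List.mem_singleton] at hb
              subst hb
              exact hsn_not_newly (hab ▸ ha)
            have hsb1 : PvISub (PySem.Set.discard a.rem tok) (newly ++ [sn]) (indeg.modify sn 0 (fun v => v - 1)) := by
              intro t ht hrt
              rcases List.mem_append.mp ht with h | h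
              · have := hsb t h (hsub' t hrt)
                rw [hgd1]
                rw [if_neg ?_]
                · exact this
                · rintro rfl; omega
              · rcases List.mem_singleton.mp h with rfl
                exact hz0
            have hsp1 : PvISup (PySem.Set.discard a.rem tok) (newly ++ [sn]) S (indeg.modify sn 0 (fun v => v - 1)) := by
              intro t ht hz
              by_cases hts : t = sn
              · subst hts; exact Or.inl (List.mem_append.mpr (Or.inr (List.mem_singleton.mpr rfl)))
              · rw [hgd1, if_neg hts] at hz
                rcases hsp t (hsub' t ht) hz with h | h
                · exact Or.inl (List.mem_append.mpr (Or.inl h))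
                · rcases List.mem_cons.mp h with rfl | h'
                  · exact absurd ht htok'
                  · exact Or.inr h'
            exact pvChainStepFinish m keys nxt f ih tok sn a indeg newly S
              hc hnd' hsub' htok' hlen' hsubK' hn
              (indeg.modify sn 0 (fun v => v - 1)) (newly ++ [sn])
              (by
                simp only [pvChainB]
                rw [if_pos hc]
                simp only [hnx tok htokK, hn, hdec, reduceIte, hnewly])
              hk1 hdeg1 hnn1 hsb1 hsp1
          · -- getD sn ≠ 0 after decrement: newly unchanged
            have hnewly : (if (indeg.modify sn 0 (fun v => v - 1)).getD sn 0 == 0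
                then newly ++ [sn] else newly) = newly := by
              rw [if_neg (by simpa using hzero)]
            have hz0 : (indeg.modify sn 0 (fun v => v - 1)).getD sn 0 ≠ 0 := by simpa using hzero
            have hsb1 : PvISub (PySem.Set.discard a.rem tok) newly (indeg.modify sn 0 (fun v => v - 1)) := by
              intro t ht hrt
              have := hsb t ht (hsub' t hrt)
              rw [hgd1, if_neg ?_]
              · exact this
              · rintro rfl; omega
            have hsp1 : PvISup (PySem.Set.discard a.rem tok) newly S (indeg.modify sn 0 (fun v => v - 1)) := by
              intro t ht hz
              by_cases hts : t = sn
              · subst hts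
                have hz0' := hz0
                rw [hgd1 t, if_pos rfl] at hz0'
                rw [hgd1 t, if_pos rfl] at hz
                exact absurd hz hz0'
              · rw [hgd1, if_neg hts] at hz
                rcases hsp t (hsub' t ht) hz with h | h
                · exact Or.inl h
                · rcases List.mem_cons.mp h with rfl | h'
                  · exact absurd ht htok'
                  · exact Or.inr h'
            exact pvChainStepFinish m keys nxt f ih tok sn a indeg newly S
              hc hnd' hsub' htok' hlen' hsubK' hn
              (indeg.modify sn 0 (fun v => v - 1)) newly
              (by
                simp only [pvChainB]
                rw [if_pos hc]
                simp only [hnx tok htokK, hn, hdec, reduceIte, hnewly])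
              hk1 hdeg1 hnn hsb1 hsp1
        · -- no decrement: sn is not a key or not in remaining any more
          have hnsn : ∀ t ∈ PySem.Set.discard a.rem tok, sn ≠ t := by
            intro t ht hts
            subst hts
            have h1 : indeg.contains sn = true := (hk sn).mpr (hsubK' sn ht)
            have h2 : PySem.Set.contains (PySem.Set.discard a.rem tok) sn = true := by
              simpa using ht
            rw [h1, h2] at hdec
            simp at hdec
          have hdeg1 : PvIDeg m (PySem.Set.discard a.rem tok) indeg := by
            intro t ht
            have h2 := hcnt t
            rw [hn] at h2
            have : (some sn == some t) = false := by simp [hnsn t ht]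
            rw [this, if_neg (by simp)] at h2
            rw [hdeg t (hsub' t ht), h2]
            simp
          have hsb1 : PvISub (PySem.Set.discard a.rem tok) newly indeg :=
            fun t ht hrt => hsb t ht (hsub' t hrt)
          have hsp1 : PvISup (PySem.Set.discard a.rem tok) newly S indeg := by
            intro t ht hz
            rcases hsp t (hsub' t ht) hz with h | h
            · exact Or.inl h
            · rcases List.mem_cons.mp h with rfl | h'
              · exact absurd ht htok'
              · exact Or.inr h'
          exact pvChainStepFinish m keys nxt f ih tok sn a indeg newly S
            hc hnd' hsub' htok' hlen' hsubK' hn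
            indeg newly
            (by
              have hdec' : (indeg.contains sn && PySem.Set.contains (PySem.Set.discard a.rem tok) sn) = false := by
                simpa using hdec
              simp only [pvChainB]
              rw [if_pos hc]
              simp only [hnx tok htokK, hn, hdec', Bool.false_eq_true, if_false])
            hk hdeg1 hnn hsb1 hsp1
    · -- token not in remaining: both sides do nothing
      have htok : tok ∉ a.rem := by simpa using hc
      have hA : pvChainA m (f+1) a tok = a := by simp [pvChainA, htok]
      have hB : pvChainB nxt (f+1) ⟨a.rem, a.out, a.idx, indeg, newly⟩ tok =
          ⟨a.rem, a.out, a.idx, indeg, newly⟩ := pvChainB_not_mem nxt (f+1) _ tok (by simpa using hc)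
      refine ⟨indeg, newly, ?_, ?_, ?_, ?_, hk, ?_, hnn, ?_, ?_⟩
      · rw [hA, hB]
      · rw [hA]; exact hnd
      · rw [hA]; exact fun x hx => hx
      · rw [hA]; exact htok
      · rw [hA]; exact hdeg
      · rw [hA]; exact hsb
      · rw [hA]
        intro t ht hz
        rcases hsp t ht hz with h | h
        · exact Or.inl h
        · rcases List.mem_cons.mp h with rfl | h'
          · exact absurd ht htok
          · exact Or.inr h'

-- ---- fold over the round's start list ----
theorem pvFold_couple (m : List (String × List (String × String))) (keys : List String)
    (nxt : List (String × Option String)) (hnx : ∀ t ∈ keys, pvGetNxt nxt t = pvNext m t) :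
    ∀ (starts : List String) (a : PvStA) (indeg : PySem.Dict String Int) (newly : List String),
    a.rem.Nodup → (∀ x ∈ a.rem, x ∈ keys) →
    PvIKeys keys indeg → PvIDeg m a.rem indeg → newly.Nodup →
    PvISub a.rem newly indeg → PvISup a.rem newly starts indeg →
    ∃ indeg' newly',
      starts.foldl (fun s tok => pvChainB nxt s.rem.length s tok) ⟨a.rem, a.out, a.idx, indeg, newly⟩ =
        ⟨(starts.foldl (fun s tok => if PySem.Set.contains s.rem tok then pvChainA m s.rem.length s tok else s) a).rem,
         (starts.foldl (fun s tok => if PySem.Set.contains s.rem tok then pvChainA m s.rem.length s tok else s) a).out,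
         (starts.foldl (fun s tok => if PySem.Set.contains s.rem tok then pvChainA m s.rem.length s tok else s) a).idx,
         indeg', newly'⟩ ∧
      (starts.foldl (fun s tok => if PySem.Set.contains s.rem tok then pvChainA m s.rem.length s tok else s) a).rem.Nodup ∧
      (∀ x ∈ (starts.foldl (fun s tok => if PySem.Set.contains s.rem tok then pvChainA m s.rem.length s tok else s) a).rem, x ∈ a.rem) ∧
      PvIKeys keys indeg' ∧
      PvIDeg m (starts.foldl (fun s tok => if PySem.Set.contains s.rem tok then pvChainA m s.rem.length s tok else s) a).rem indeg' ∧
      newly'.Nodup ∧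
      PvISub (starts.foldl (fun s tok => if PySem.Set.contains s.rem tok then pvChainA m s.rem.length s tok else s) a).rem newly' indeg' ∧
      PvISup (starts.foldl (fun s tok => if PySem.Set.contains s.rem tok then pvChainA m s.rem.length s tok else s) a).rem newly' [] indeg' := by
  intro starts
  induction starts with
  | nil =>
    intro a indeg newly hnd hsubK hk hdeg hnn hsb hsp
    exact ⟨indeg, newly, rfl, hnd, fun x hx => hx, hk, hdeg, hnn, hsb, hsp⟩
  | cons tok rest ih =>
    intro a indeg newly hnd hsubK hk hdeg hnn hsb hsp
    simp only [List.foldl_cons]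
    by_cases hct : PySem.Set.contains a.rem tok = true
    · rw [if_pos hct]
      rcases pvChain_couple m keys nxt hnx a.rem.length tok a indeg newly rest
          hnd hsubK (le_refl _) hk hdeg hnn hsb hsp with
        ⟨indeg1, newly1, heq, hr1, hr2, hr3, hr4, hr5, hr6, hr7, hr8⟩
      rw [heq]
      rcases ih (pvChainA m a.rem.length a tok) indeg1 newly1 hr1
          (fun x hx => hsubK x (hr2 x hx)) hr4 hr5 hr6 hr7 hr8 with
        ⟨i2, n2, g0, g1, g2, g3, g4, g5, g6, g7⟩
      exact ⟨i2, n2, g0, g1, fun x hx => hr2 x (g2 x hx), g3, g4, g5, g6, g7⟩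
    · rw [if_neg hct]
      have hB := pvChainB_not_mem nxt a.rem.length ⟨a.rem, a.out, a.idx, indeg, newly⟩ tok (by simpa using hct)
      rw [hB]
      have hsp' : PvISup a.rem newly rest indeg := by
        intro t ht hz
        rcases hsp t ht hz with h | h
        · exact Or.inl h
        · rcases List.mem_cons.mp h with rfl | h'
          · exact absurd (by simpa using ht) hct
          · exact Or.inr h'
      exact ih a indeg newly hnd hsubK hk hdeg hnn hsb hsp'

-- ---- pointed-set characterization ----
theorem pvMemPointed (m : List (String × List (String × String))) (R : PySem.Set String) :
    ∀ (l : List String) (acc : PySem.Set String) (x : String),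
    x ∈ l.foldl (fun acc token =>
        match pvNext m token with
        | some n => if PySem.Set.contains R n then PySem.Set.add acc n else acc
        | none => acc) acc ↔ x ∈ acc ∨ ∃ u ∈ l, pvNext m u = some x ∧ x ∈ R := by
  intro l
  induction l with
  | nil => intro acc x; simp
  | cons u t ih =>
    intro acc x
    simp only [List.foldl_cons]
    rw [ih]
    cases hu : pvNext m u with
    | none => simp [hu]
    | some n =>
      by_cases hr : PySem.Set.contains R n = true
      · have hrm : n ∈ R := by simpa using hr
        simp only [hr, if_true, PySem.Set.mem_add]
        constructor
        · rintro ((h | rfl) | ⟨v, hv, h1, h2⟩)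
          · exact Or.inl h
          · exact Or.inr ⟨u, List.mem_cons_self .., hu, hrm⟩
          · exact Or.inr ⟨v, List.mem_cons_of_mem _ hv, h1, h2⟩
        · rintro (h | ⟨v, hv, h1, h2⟩)
          · exact Or.inl (Or.inl h)
          · rcases List.mem_cons.mp hv with rfl | hv'
            · rw [hu] at h1; exact Or.inl (Or.inr (Option.some.inj h1).symm)
            · exact Or.inr ⟨v, hv', h1, h2⟩
      · have hrm : x ∈ R → ¬ (n = x) := by
          intro hxR rfl; exact hr (by simpa using hxR)
        simp only [hr, Bool.false_eq_true, if_false]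
        constructor
        · rintro (h | ⟨v, hv, h1, h2⟩)
          · exact Or.inl h
          · exact Or.inr ⟨v, List.mem_cons_of_mem _ hv, h1, h2⟩
        · rintro (h | ⟨v, hv, h1, h2⟩)
          · exact Or.inl h
          · rcases List.mem_cons.mp hv with rfl | hv'
            · rw [hu] at h1; exact absurd (Option.some.inj h1) (hrm h2)
            · exact Or.inr ⟨v, hv', h1, h2⟩

-- ---- the two start lists agree ----
theorem pvStartsEq (m : List (String × List (String × String)))
    (rem newly : List String) (indeg : PySem.Dict String Int)
    (hnd : rem.Nodup) (hdeg : PvIDeg m rem indeg) (hnn : newly.Nodup)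
    (hsub : PvISub rem newly indeg) (hsup : PvISup rem newly [] indeg) :
    PySem.List.sorted (rem.filter (fun t => !(PySem.Set.contains
        (rem.foldl (fun acc token =>
          match pvNext m token with
          | some n => if PySem.Set.contains rem n then PySem.Set.add acc n else acc
          | none => acc) PySem.Set.empty) t))) (fun x => x) false =
      (PySem.List.sorted newly (fun x => x) false).filter (fun t => PySem.Set.contains rem t) := by
  have hpt : ∀ x, x ∈ (rem.foldl (fun acc token =>
      match pvNext m token with
      | some n => if PySem.Set.contains rem n then PySem.Set.add acc n else acc
      | none => acc) PySem.Set.empty) ↔ ∃ u ∈ rem, pvNext m u = some x ∧ x ∈ rem := by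
    intro x
    rw [pvMemPointed]
    simp [PySem.Set.empty]
  have hzero : ∀ t ∈ rem, (indeg.getD t 0 = 0 ↔ ¬ ∃ u ∈ rem, pvNext m u = some t) := by
    intro t ht
    rw [hdeg t ht]
    constructor
    · rintro h ⟨u, hu, hnxu⟩
      have hmemf : u ∈ rem.filter (fun u => pvNext m u == some t) :=
        List.mem_filter.mpr ⟨hu, by simp [hnxu]⟩
      have := List.length_pos_of_mem hmemf
      simp only [Nat.cast_eq_zero] at h
      omega
    · intro h
      have : rem.filter (fun u => pvNext m u == some t) = [] := by
        apply List.filter_eq_nil_iff.mpr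
        intro u hu
        simp only [beq_iff_eq]
        intro hnxu
        exact h ⟨u, hu, hnxu⟩
      simp [this]
  have hmemys : ∀ t, t ∈ (PySem.List.sorted newly (fun x => x) false).filter (fun t => PySem.Set.contains rem t) ↔
      t ∈ rem.filter (fun t => !(PySem.Set.contains
        (rem.foldl (fun acc token =>
          match pvNext m token with
          | some n => if PySem.Set.contains rem n then PySem.Set.add acc n else acc
          | none => acc) PySem.Set.empty) t)) := by
    intro t
    rw [List.mem_filter, List.mem_filter]
    constructor
    · rintro ⟨hts, htr⟩
      have htn : t ∈ newly := (PySem.List.mem_sorted _ _ _ _).mp hts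
      have htr' : t ∈ rem := by simpa using htr
      have hz := hsub t htn htr'
      refine ⟨htr', ?_⟩
      have : ¬ (t ∈ (rem.foldl (fun acc token =>
          match pvNext m token with
          | some n => if PySem.Set.contains rem n then PySem.Set.add acc n else acc
          | none => acc) PySem.Set.empty)) := by
        rw [hpt]
        rintro ⟨u, hu, hnxu, _⟩
        exact ((hzero t htr').mp hz) ⟨u, hu, hnxu⟩
      simpa using this
    · rintro ⟨htr, hnp⟩
      have htP : ¬ (t ∈ (rem.foldl (fun acc token =>
          match pvNext m token with
          | some n => if PySem.Set.contains rem n then PySem.Set.add acc n else acc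
          | none => acc) PySem.Set.empty)) := by simpa using hnp
      have hnp' : ¬ ∃ u ∈ rem, pvNext m u = some t := by
        intro hex
        apply htP
        rw [hpt]
        rcases hex with ⟨u, hu, hnxu⟩
        exact ⟨u, hu, hnxu, htr⟩
      have hz : indeg.getD t 0 = 0 := (hzero t htr).mpr hnp'
      rcases hsup t htr hz with htn | hf
      · exact ⟨(PySem.List.mem_sorted _ _ _ _).mpr htn, by simpa using htr⟩
      · cases hf
  have hsortnd : (PySem.List.sorted newly (fun x => x) false).Nodup :=
    (PySem.List.sorted_perm newly (fun x => x) false).nodup_iff.mpr hnn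
  have hsortle : (PySem.List.sorted newly (fun x => x) false).Pairwise (fun a b => a ≤ b) :=
    PySem.List.sorted_pairwise newly (fun x => x)
  have hsortlt : (PySem.List.sorted newly (fun x => x) false).Pairwise (fun a b => a < b) :=
    (hsortle.and hsortnd).imp (fun h => lt_of_le_of_ne h.1 h.2)
  have hyslt := hsortlt.filter (fun t => PySem.Set.contains rem t)
  have hysnd : ((PySem.List.sorted newly (fun x => x) false).filter (fun t => PySem.Set.contains rem t)).Nodup :=
    hsortnd.filter _
  have hfilnd : (rem.filter (fun t => !(PySem.Set.contains
        (rem.foldl (fun acc token =>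
          match pvNext m token with
          | some n => if PySem.Set.contains rem n then PySem.Set.add acc n else acc
          | none => acc) PySem.Set.empty) t))).Nodup := hnd.filter _
  have hperm := (List.perm_ext_iff_of_nodup hysnd hfilnd).mpr hmemys
  exact PySem.List.sorted_eq_of_perm_of_pairwise_lt _ _ _ hperm hyslt

-- ---- the pointer scan finds min(remaining) ----
theorem pvScanSpec (order : List String) (rem : PySem.Set String) :
    ∀ (fuel ptr : Nat),
    (∃ j, ptr ≤ j ∧ j < order.length ∧ order.getD j "" ∈ rem ∧ j - ptr < fuel) →
    (∀ j < ptr, order.getD j "" ∉ rem) →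
    order.getD (pvScanPtr order rem fuel ptr) "" ∈ rem ∧
    (∀ j < pvScanPtr order rem fuel ptr, order.getD j "" ∉ rem) ∧
    pvScanPtr order rem fuel ptr < order.length := by
  intro fuel
  induction fuel with
  | zero =>
    rintro ptr ⟨j, hj1, hj2, hj3, hj4⟩ hpr
    omega
  | succ f ih =>
    rintro ptr ⟨j, hj1, hj2, hj3, hj4⟩ hpr
    by_cases hc : PySem.Set.contains rem (order.getD ptr "") = true
    · have hm : order.getD ptr "" ∈ rem := by simpa using hc
      simp only [pvScanPtr, hc, if_true]
      exact ⟨hm, hpr, by omega⟩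
    · have hm : order.getD ptr "" ∉ rem := by simpa using hc
      have hne : ptr ≠ j := by rintro rfl; exact hm hj3
      simp only [pvScanPtr, hc, Bool.false_eq_true, if_false]
      exact ih (ptr + 1) ⟨j, by omega, hj2, hj3, by omega⟩
        (fun j' hj' => by
          rcases Nat.lt_succ_iff_lt_or_eq.mp hj' with h | rfl
          · exact hpr j' h
          · exact hm)

theorem pvMinEq (order : List String) (rem : List String) (p : Nat)
    (hp : order.Pairwise (· < ·)) (hsub : ∀ x ∈ rem, x ∈ order)
    (hmem : order.getD p "" ∈ rem) (hmin : ∀ j < p, order.getD j "" ∉ rem) (hlt : p < order.length) :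
    (PySem.List.sorted rem (fun x => x) false).headD "" = order.getD p "" := by
  cases hl : PySem.List.sorted rem (fun x => x) false with
  | nil =>
    have : rem = [] := (PySem.List.sorted_eq_nil_iff _ _ _).mp hl
    rw [this] at hmem
    cases hmem
  | cons h t =>
    have hmin' : ∀ y ∈ rem, h ≤ y := PySem.List.key_head_sorted_le rem (fun x => x) hl
    have hhr : h ∈ rem := by
      have : h ∈ PySem.List.sorted rem (fun x => x) false := by rw [hl]; exact List.mem_cons_self ..
      exact (PySem.List.mem_sorted _ _ _ _).mp this
    rcases List.mem_iff_getElem.mp (hsub h hhr) with ⟨k, hk, hgk⟩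
    have hpk : p ≤ k := by
      by_contra hcon
      rw [Nat.not_le] at hcon
      exact hmin k hcon (by rw [List.getD_eq_getElem _ _ hk, hgk]; exact hhr)
    have h1 : h ≤ order.getD p "" := hmin' _ hmem
    have h2 : order.getD p "" ≤ h := by
      rw [List.getD_eq_getElem _ _ hlt, ← hgk]
      rcases Nat.lt_or_ge p k with hlt' | hge
      · exact le_of_lt (List.pairwise_iff_getElem.mp hp p k hlt hk hlt')
      · have : p = k := by omega
        subst this; rfl
    simp only [List.headD_cons]
    exact le_antisymm h1 h2

-- ---- one round ----
def PvIPtr (order rem : List String) (ptr : Nat) : Prop := ∀ j < ptr, order.getD j "" ∉ rem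

theorem pvRound_couple (m : List (String × List (String × String))) (keys : List String)
    (nxt : List (String × Option String)) (order : List String)
    (hnx : ∀ t ∈ keys, pvGetNxt nxt t = pvNext m t)
    (horder : order = PySem.List.sorted keys (fun x => x) false) (hknd : keys.Nodup)
    (a : PvStA) (indeg : PySem.Dict String Int) (newly : List String) (ptr : Nat)
    (hnd : a.rem.Nodup) (hsubk : ∀ x ∈ a.rem, x ∈ keys) (hne : a.rem ≠ [])
    (hk : PvIKeys keys indeg) (hdeg : PvIDeg m a.rem indeg) (hnn : newly.Nodup)
    (hsb : PvISub a.rem newly indeg) (hsp : PvISup a.rem newly [] indeg)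
    (hptr : PvIPtr order a.rem ptr) :
    ∃ indeg' newly' ptr',
      pvRoundB nxt order ⟨a.rem, a.out, a.idx, indeg, newly⟩ ptr =
        (⟨(pvRoundA m a).rem, (pvRoundA m a).out, (pvRoundA m a).idx, indeg', newly'⟩, ptr') ∧
      (pvRoundA m a).rem.Nodup ∧ (∀ x ∈ (pvRoundA m a).rem, x ∈ keys) ∧
      PvIKeys keys indeg' ∧ PvIDeg m (pvRoundA m a).rem indeg' ∧ newly'.Nodup ∧
      PvISub (pvRoundA m a).rem newly' indeg' ∧ PvISup (pvRoundA m a).rem newly' [] indeg' ∧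
      PvIPtr order (pvRoundA m a).rem ptr' := by
  have hS := pvStartsEq m a.rem newly indeg hnd hdeg hnn hsb hsp
  have hordnd : order.Nodup :=
    horder ▸ ((PySem.List.sorted_perm keys (fun x => x) false).nodup_iff.mpr hknd)
  have hordlt : order.Pairwise (· < ·) := by
    rw [horder]
    exact ((PySem.List.sorted_pairwise keys (fun x => x)).and
      ((PySem.List.sorted_perm keys (fun x => x) false).nodup_iff.mpr hknd)).imp
      (fun h => lt_of_le_of_ne h.1 h.2)
  have hordmem : ∀ x ∈ a.rem, x ∈ order := by
    intro x hx
    rw [horder]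
    exact (PySem.List.mem_sorted _ _ _ _).mpr (hsubk x hx)
  have hmemSB : ∀ t, t ∈ (PySem.List.sorted newly (fun x => x) false).filter
      (fun t => PySem.Set.contains a.rem t) ↔ t ∈ newly ∧ t ∈ a.rem := by
    intro t
    rw [List.mem_filter, PySem.List.mem_sorted]
    constructor
    · rintro ⟨h1, h2⟩; exact ⟨h1, by simpa using h2⟩
    · rintro ⟨h1, h2⟩; exact ⟨h1, by simpa using h2⟩
  by_cases hSE : ((PySem.List.sorted newly (fun x => x) false).filter
      (fun t => PySem.Set.contains a.rem t)).isEmpty = true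
  · -- no start token: both take the minimal remaining token
    have hSBnil : (PySem.List.sorted newly (fun x => x) false).filter
        (fun t => PySem.Set.contains a.rem t) = [] := List.isEmpty_iff.mp hSE
    -- scan specification
    rcases List.exists_mem_of_ne_nil a.rem hne with ⟨x0, hx0⟩
    rcases List.mem_iff_getElem.mp (hordmem x0 hx0) with ⟨k, hklt, hgk⟩
    have hwit : ∃ j, ptr ≤ j ∧ j < order.length ∧ order.getD j "" ∈ a.rem ∧ j - ptr < order.length := by
      refine ⟨k, ?_, hklt, ?_, by omega⟩
      · by_contra hcon
        rw [Nat.not_le] at hcon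
        exact hptr k hcon (by rw [List.getD_eq_getElem _ _ hklt, hgk]; exact hx0)
      · rw [List.getD_eq_getElem _ _ hklt, hgk]; exact hx0
    rcases pvScanSpec order a.rem order.length ptr hwit hptr with ⟨hp1, hp2, hp3⟩
    have hmin := pvMinEq order a.rem (pvScanPtr order a.rem order.length ptr) hordlt hordmem hp1 hp2 hp3
    -- ISup with the singleton start list
    have hsing : PvISup a.rem ([] : List String)
        [order.getD (pvScanPtr order a.rem order.length ptr) ""] indeg := by
      intro t ht hz
      rcases hsp t ht hz with h | h
      · exfalso
        have : t ∈ (PySem.List.sorted newly (fun x => x) false).filter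
            (fun t => PySem.Set.contains a.rem t) := (hmemSB t).mpr ⟨h, ht⟩
        rw [hSBnil] at this
        cases this
      · cases h
    rcases pvFold_couple m keys nxt hnx
        [order.getD (pvScanPtr order a.rem order.length ptr) ""] a indeg []
        hnd hsubk hk hdeg List.nodup_nil (fun t ht => absurd ht (List.not_mem_nil)) hsing with
      ⟨i', n', geq, g1, g2, g3, g4, g5, g6, g7⟩
    have hRA : pvRoundA m a =
        [(PySem.List.sorted a.rem (fun x => x) false).headD ""].foldl
          (fun s tok => if PySem.Set.contains s.rem tok then pvChainA m s.rem.length s tok else s) a := by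
      simp only [pvRoundA]
      rw [hS, hSBnil]
      rfl
    have hRB : pvRoundB nxt order ⟨a.rem, a.out, a.idx, indeg, newly⟩ ptr =
        ([order.getD (pvScanPtr order a.rem order.length ptr) ""].foldl
          (fun s tok => pvChainB nxt s.rem.length s tok) ⟨a.rem, a.out, a.idx, indeg, []⟩,
         pvScanPtr order a.rem order.length ptr) := by
      simp only [pvRoundB]
      rw [hSBnil]
      rfl
    refine ⟨i', n', pvScanPtr order a.rem order.length ptr, ?_, ?_, ?_, g3, ?_, g5, ?_, ?_, ?_⟩
    · rw [hRB, hRA, hmin, geq]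
    · rw [hRA, hmin]; exact g1
    · rw [hRA, hmin]; exact fun x hx => hsubk x (g2 x hx)
    · rw [hRA, hmin]; exact g4
    · rw [hRA, hmin]; exact g6
    · rw [hRA, hmin]; exact g7
    · rw [hRA, hmin]
      intro j hj
      exact fun hmem => hp2 j hj (g2 _ hmem)
  · -- start tokens exist: both process them in the same sorted order
    have hsups : PvISup a.rem ([] : List String)
        ((PySem.List.sorted newly (fun x => x) false).filter (fun t => PySem.Set.contains a.rem t)) indeg := by
      intro t ht hz
      rcases hsp t ht hz with h | h
      · exact Or.inr ((hmemSB t).mpr ⟨h, ht⟩)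
      · cases h
    rcases pvFold_couple m keys nxt hnx
        ((PySem.List.sorted newly (fun x => x) false).filter (fun t => PySem.Set.contains a.rem t))
        a indeg []
        hnd hsubk hk hdeg List.nodup_nil (fun t ht => absurd ht (List.not_mem_nil)) hsups with
      ⟨i', n', geq, g1, g2, g3, g4, g5, g6, g7⟩
    have hRA : pvRoundA m a =
        ((PySem.List.sorted newly (fun x => x) false).filter (fun t => PySem.Set.contains a.rem t)).foldl
          (fun s tok => if PySem.Set.contains s.rem tok then pvChainA m s.rem.length s tok else s) a := by
      simp only [pvRoundA]
      rw [hS, if_neg hSE]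
    have hRB : pvRoundB nxt order ⟨a.rem, a.out, a.idx, indeg, newly⟩ ptr =
        (((PySem.List.sorted newly (fun x => x) false).filter (fun t => PySem.Set.contains a.rem t)).foldl
          (fun s tok => pvChainB nxt s.rem.length s tok) ⟨a.rem, a.out, a.idx, indeg, []⟩, ptr) := by
      simp only [pvRoundB]
      rw [if_neg hSE]
    refine ⟨i', n', ptr, ?_, ?_, ?_, g3, ?_, g5, ?_, ?_, ?_⟩
    · rw [hRB, hRA, geq]
    · rw [hRA]; exact g1
    · rw [hRA]; exact fun x hx => hsubk x (g2 x hx)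
    · rw [hRA]; exact g4
    · rw [hRA]; exact g6
    · rw [hRA]; exact g7
    · rw [hRA]
      intro j hj
      exact fun hmem => hptr j hj (g2 _ hmem)

-- ---- all rounds ----
theorem pvRounds_couple (m : List (String × List (String × String))) (keys : List String)
    (nxt : List (String × Option String)) (order : List String)
    (hnx : ∀ t ∈ keys, pvGetNxt nxt t = pvNext m t)
    (horder : order = PySem.List.sorted keys (fun x => x) false) (hknd : keys.Nodup) :
    ∀ (fuel : Nat) (a : PvStA) (indeg : PySem.Dict String Int) (newly : List String) (ptr : Nat),
    a.rem.Nodup → (∀ x ∈ a.rem, x ∈ keys) →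
    PvIKeys keys indeg → PvIDeg m a.rem indeg → newly.Nodup →
    PvISub a.rem newly indeg → PvISup a.rem newly [] indeg → PvIPtr order a.rem ptr →
    pvRoundsA m fuel a = pvRoundsB nxt order fuel (⟨a.rem, a.out, a.idx, indeg, newly⟩, ptr) := by
  intro fuel
  induction fuel with
  | zero => intro a indeg newly ptr _ _ _ _ _ _ _ _; rfl
  | succ f ih =>
    intro a indeg newly ptr hnd hsubk hk hdeg hnn hsb hsp hptr
    simp only [pvRoundsA, pvRoundsB]
    by_cases hE : a.rem.isEmpty = true
    · rw [if_pos hE, if_pos hE]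
    · have hne : a.rem ≠ [] := fun h => hE (by simp [h])
      rcases pvRound_couple m keys nxt order hnx horder hknd a indeg newly ptr
          hnd hsubk hne hk hdeg hnn hsb hsp hptr with
        ⟨i', n', p', heq, r1, r2, r3, r4, r5, r6, r7, r8⟩
      rw [if_neg hE, if_neg hE, heq]
      exact ih (pvRoundA m a) i' n' p' r1 r2 r3 r4 r5 r6 r7 r8

-- ---- initial in-degree table ----
theorem pvInit0_getD (ks : List String) : ∀ (d : PySem.Dict String Int) (x : String),
    (ks.foldl (fun d t => d.insert t (0 : Int)) d).getD x 0 = if x ∈ ks then 0 else d.getD x 0 := by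
  induction ks with
  | nil => intro d x; simp
  | cons k t ih =>
    intro d x
    simp only [List.foldl_cons]
    rw [ih]
    by_cases hx : x ∈ t
    · simp [hx]
    · by_cases hk : x = k
      · subst hk; simp [hx]
      · simp [hx, hk, PySem.Dict.getD_insert]

theorem pvInit0_contains (ks : List String) : ∀ (d : PySem.Dict String Int) (x : String),
    (ks.foldl (fun d t => d.insert t (0 : Int)) d).contains x = (d.contains x || decide (x ∈ ks)) := by
  induction ks with
  | nil => intro d x; simp
  | cons k t ih =>
    intro d x
    simp only [List.foldl_cons]
    rw [ih]
    simp only [PySem.Dict.contains_insert]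
    by_cases hk : x = k <;> by_cases hx : x ∈ t <;> simp [hk, hx]

theorem pvIncr_contains (pairs : List (String × Option String)) :
    ∀ (d : PySem.Dict String Int) (x : String),
    (pairs.foldl (fun d p =>
      match p.2 with
      | some s => if d.contains s then d.modify s 0 (fun v => v + 1) else d
      | none => d) d).contains x = d.contains x := by
  induction pairs with
  | nil => intro d x; simp
  | cons p t ih =>
    intro d x
    simp only [List.foldl_cons]
    cases hp : p.2 with
    | none => rw [ih]
    | some v =>
      by_cases hc : d.contains v = true
      · simp only [hc, if_true]
        rw [ih]
        by_cases hx : x = v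
        · subst hx; simp [PySem.Dict.contains_modify, hc]
        · simp [PySem.Dict.contains_modify, hx]
      · simp only [hc]
        rw [if_neg (by simp), ih]

theorem pvIncr_getD (pairs : List (String × Option String)) :
    ∀ (d : PySem.Dict String Int) (x : String),
    (pairs.foldl (fun d p =>
      match p.2 with
      | some s => if d.contains s then d.modify s 0 (fun v => v + 1) else d
      | none => d) d).getD x 0 =
      d.getD x 0 + (if d.contains x then ((pairs.countP (fun p => p.2 == some x)) : Int) else 0) := by
  induction pairs with
  | nil => intro d x; simp
  | cons p t ih =>
    intro d x
    simp only [List.foldl_cons, List.countP_cons]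
    cases hp : p.2 with
    | none =>
      rw [ih]
      simp
    | some v =>
      by_cases hc : d.contains v = true
      · simp only [hc, if_true]
        rw [ih]
        simp only [PySem.Dict.contains_modify, PySem.Dict.getD_modify]
        by_cases hx : x = v
        · subst hx
          simp [hc]
          ring
        · have : (some v == some x) = false := by simp [Ne.symm hx]
          simp [hx, this]
      · simp only [hc]
        rw [if_neg (by simp), ih]
        by_cases hx : x = v
        · subst hx
          simp [hc]
        · have hvx : (some v == some x) = false := by simp [Ne.symm hx]
          simp [hvx]


-- ===== VERDICT =====
theorem build_nuscenes_scene_token_time_index_py_spec : Claim_equal_build_nuscenes_scene_token_time_index_py := by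
  intro scene_info _hdom
  unfold Spec_build_nuscenes_scene_token_time_index_py
  by_cases hE : scene_info.isEmpty = true
  · simp only [build_nuscenes_scene_token_time_index_py,
      build_nuscenes_scene_token_time_index_py_alt, if_pos hE]
  · simp only [build_nuscenes_scene_token_time_index_py,
      build_nuscenes_scene_token_time_index_py_alt, if_neg hE]
    have hknd : (PySem.List.dedup (scene_info.map (fun p => p.1))).Nodup := PySem.List.nodup_dedup _
    have hAK : PySem.Set.ofList (scene_info.map (fun p => p.1)) =
        PySem.List.dedup (scene_info.map (fun p => p.1)) := rfl
    have hBK : PySem.Set.ofList (PySem.List.dedup (scene_info.map (fun p => p.1))) =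
        PySem.List.dedup (scene_info.map (fun p => p.1)) :=
      PySem.Set.ofList_eq_self_of_nodup _ hknd
    rw [hAK, hBK]
    have hnx : ∀ t ∈ PySem.List.dedup (scene_info.map (fun p => p.1)),
        pvGetNxt ((PySem.List.dedup (scene_info.map (fun p => p.1))).map
          (fun t => (t, pvNext scene_info t))) t = pvNext scene_info t :=
      fun t ht => pvGetNxt_eq scene_info _ t ht
    have hIK : PvIKeys (PySem.List.dedup (scene_info.map (fun p => p.1)))
        (((PySem.List.dedup (scene_info.map (fun p => p.1))).map (fun t => (t, pvNext scene_info t))).foldl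
          (fun d p => match p.2 with
            | some s => if d.contains s then d.modify s 0 (fun v => v + 1) else d
            | none => d)
          ((PySem.List.dedup (scene_info.map (fun p => p.1))).foldl
            (fun d t => d.insert t (0 : Int)) PySem.Dict.empty)) := by
      intro x
      rw [pvIncr_contains, pvInit0_contains]
      simp
    have hIDeg : PvIDeg scene_info (PySem.List.dedup (scene_info.map (fun p => p.1)))
        (((PySem.List.dedup (scene_info.map (fun p => p.1))).map (fun t => (t, pvNext scene_info t))).foldl
          (fun d p => match p.2 with
            | some s => if d.contains s then d.modify s 0 (fun v => v + 1) else d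
            | none => d)
          ((PySem.List.dedup (scene_info.map (fun p => p.1))).foldl
            (fun d t => d.insert t (0 : Int)) PySem.Dict.empty)) := by
      intro t ht
      rw [pvIncr_getD, pvInit0_getD]
      rw [pvInit0_contains]
      simp only [PySem.Dict.contains_empty, Bool.false_or, ht, decide_true, if_pos]
      rw [List.countP_map]
      rw [List.countP_eq_length_filter]
      simp [PySem.List.dedup]
      rfl
    set K := PySem.List.dedup (scene_info.map (fun p => p.1)) with hK
    set indeg : PySem.Dict String Int := ((K.map (fun t => (t, pvNext scene_info t))).foldl
          (fun d p => match p.2 with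
            | some s => if d.contains s then d.modify s 0 (fun v => v + 1) else d
            | none => d)
          (K.foldl (fun d t => d.insert t (0 : Int)) PySem.Dict.empty)) with hindeg
    have hordnd : (PySem.List.sorted K (fun x => x) false).Nodup :=
      (PySem.List.sorted_perm K (fun x => x) false).nodup_iff.mpr hknd
    have hnn0 : ((PySem.List.sorted K (fun x => x) false).filter
        (fun t => indeg.getD t 0 == 0)).Nodup := hordnd.filter _
    have hsb0 : PvISub K ((PySem.List.sorted K (fun x => x) false).filter
        (fun t => indeg.getD t 0 == 0)) indeg := by
      intro t ht _
      have := (List.mem_filter.mp ht).2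
      simpa using this
    have hsp0 : PvISup K ((PySem.List.sorted K (fun x => x) false).filter
        (fun t => indeg.getD t 0 == 0)) [] indeg := by
      intro t ht hz
      refine Or.inl (List.mem_filter.mpr ⟨(PySem.List.mem_sorted _ _ _ _).mpr ht, by simpa using hz⟩)
    exact congrArg PySem.Dict.items
      (pvRounds_couple scene_info K (K.map (fun t => (t, pvNext scene_info t)))
        (PySem.List.sorted K (fun x => x) false) hnx rfl hknd (K.length + 1)
        ⟨K, PySem.Dict.empty, 0⟩ indeg
        ((PySem.List.sorted K (fun x => x) false).filter (fun t => indeg.getD t 0 == 0)) 0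
        hknd (fun x hx => hx) hIK hIDeg hnn0 hsb0 hsp0
        (fun j hj => absurd hj (Nat.not_lt_zero j)))
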